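-- pv_equiv track=rewrite | github.com/hoyun06/python_algorithm | 백준/Gold/9205. 맥주 마시면서 걸어가기/맥주 마시면서 걸어가기.py | dfs
-- ===== SOURCE A (Python) =====
-- def calculateDistance(x1, y1, x2, y2):
--     return abs(x2 - x1) + abs(y2 - y1)
--
-- def dfs(x, y, status, store, festival, statusIndex, length):
--     if 1000 >= calculateDistance(x, y, festival[0], festival[1]):
--         return 1
--
--     result = 0
--     status[statusIndex] = 1
--     for i in range(length):
--         posX, posY = store[i]
--         if status[i] == 0 and calculateDistance(x, y, posX, posY) <= 1000:
--             tmp = dfs(posX, posY, status, store, festival, i, length)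
--             if tmp == 1:
--                 return tmp
--     return result
-- ===== SOURCE B (Python) =====
-- def dfs(x, y, status, store, festival, statusIndex, length):
--     fx, fy = festival
--     if abs(fx - x) + abs(fy - y) <= 1000:
--         return 1
--     status[statusIndex] = 1
--     stack = [(x, y, 0)]
--     while stack:
--         cx, cy, i = stack.pop()
--         while i < length:
--             px, py = store[i]
--             if status[i] == 0 and abs(px - cx) + abs(py - cy) <= 1000:
--                 if abs(fx - px) + abs(fy - py) <= 1000:
--                     return 1
--                 status[i] = 1
--                 stack.append((cx, cy, i + 1))
--                 cx, cy, i = px, py, 0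
--             else:
--                 i += 1
--     return 0
-- ===== Notes on version B (the rewrite author's own statement) =====
-- stated objective: alternative
-- what changed: Replaced the recursive depth-first search by an iterative one driven by an explicit stack of (x, y, cursor) frames with a resumable neighbor cursor, preserving the exact visit order and early exit.
import Mathlib
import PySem

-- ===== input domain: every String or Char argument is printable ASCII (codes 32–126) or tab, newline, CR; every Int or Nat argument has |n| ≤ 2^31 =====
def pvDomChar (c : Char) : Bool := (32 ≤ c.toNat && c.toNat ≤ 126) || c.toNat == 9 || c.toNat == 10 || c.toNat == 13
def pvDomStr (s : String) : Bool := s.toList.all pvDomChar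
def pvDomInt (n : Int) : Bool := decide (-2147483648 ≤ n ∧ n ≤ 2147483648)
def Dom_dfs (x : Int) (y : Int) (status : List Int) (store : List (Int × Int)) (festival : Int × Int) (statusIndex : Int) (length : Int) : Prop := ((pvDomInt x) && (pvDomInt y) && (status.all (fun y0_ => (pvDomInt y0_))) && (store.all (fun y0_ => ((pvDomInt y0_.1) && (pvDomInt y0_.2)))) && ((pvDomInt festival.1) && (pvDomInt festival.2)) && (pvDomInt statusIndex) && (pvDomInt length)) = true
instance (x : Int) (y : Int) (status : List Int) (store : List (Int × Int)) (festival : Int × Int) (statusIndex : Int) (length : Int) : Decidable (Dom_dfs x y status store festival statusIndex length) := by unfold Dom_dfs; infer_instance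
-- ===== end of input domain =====

-- B replaces A's recursive DFS by an explicit-stack iterative DFS with the same visit order
-- (objective: alternative decomposition). Both Pythons mutate `status` in place identically;
-- the equivalence proved here is about the RETURN value.

-- shared helper = Python's calculateDistance
def pvDist (x1 : Int) (y1 : Int) (x2 : Int) (y2 : Int) : Int := |x2 - x1| + |y2 - y1|

-- number of 0 entries; Lean-only fuel bound for the recursions (Python needs none)
def pvZeros (l : List Int) : Nat := l.countP (fun a => a == 0)

-- ===== PORT A ===== (recursive DFS; `fuel` is a totality device, one unit per node entered;
-- the loop threads the mutated status list, so the pair (result, status) is returned)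
mutual
def dfsF (fuel : Nat) (x : Int) (y : Int) (status : List Int) (store : List (Int × Int)) (festival : Int × Int) (statusIndex : Int) (length : Int) : Int × List Int :=
  if pvDist x y festival.1 festival.2 ≤ 1000 then (1, status)
  else if fuel = 0 then (0, status)
  else loopA (fuel - 1) x y (PySem.List.pySetD status statusIndex 1) store festival length 0
termination_by (fuel, 0)
decreasing_by all_goals (apply Prod.Lex.left; omega)

def loopA (fuel : Nat) (x : Int) (y : Int) (status : List Int) (store : List (Int × Int)) (festival : Int × Int) (length : Int) (i : Int) : Int × List Int :=
  if i < length then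
    if PySem.List.pyGetD status i 1 = 0 ∧
        pvDist x y (PySem.List.pyGetD store i (0, 0)).1 (PySem.List.pyGetD store i (0, 0)).2 ≤ 1000 then
      if (dfsF fuel (PySem.List.pyGetD store i (0, 0)).1 (PySem.List.pyGetD store i (0, 0)).2 status store festival i length).1 = 1 then
        dfsF fuel (PySem.List.pyGetD store i (0, 0)).1 (PySem.List.pyGetD store i (0, 0)).2 status store festival i length
      else
        loopA fuel x y (dfsF fuel (PySem.List.pyGetD store i (0, 0)).1 (PySem.List.pyGetD store i (0, 0)).2 status store festival i length).2 store festival length (i + 1)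
    else loopA fuel x y status store festival length (i + 1)
  else (0, status)
termination_by (fuel, (length - i).toNat + 1)
decreasing_by all_goals first
  | (apply Prod.Lex.left; omega)
  | (apply Prod.Lex.right; omega)
end

def dfs (x : Int) (y : Int) (status : List Int) (store : List (Int × Int)) (festival : Int × Int) (statusIndex : Int) (length : Int) : Int :=
  (dfsF (pvZeros status + 1) x y status store festival statusIndex length).1

-- ===== PORT B ===== (iterative DFS over an explicit stack of (x, y, cursor) frames; the
-- top frame's inner while-loop of Source B is the cursor scan; `fuel` is the same totality device)
def pvFrameW (length : Int) (fr : Int × Int × Int) : Nat := (length - fr.2.2).toNat + 1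

def runB (fuel : Nat) (frames : List (Int × Int × Int)) (status : List Int) (store : List (Int × Int)) (festival : Int × Int) (length : Int) : Int :=
  match frames with
  | [] => 0
  | (cx, cy, i) :: rest =>
    if i < length then
      if PySem.List.pyGetD status i 1 = 0 ∧
          pvDist cx cy (PySem.List.pyGetD store i (0, 0)).1 (PySem.List.pyGetD store i (0, 0)).2 ≤ 1000 then
        if pvDist (PySem.List.pyGetD store i (0, 0)).1 (PySem.List.pyGetD store i (0, 0)).2 festival.1 festival.2 ≤ 1000 then 1
        else if fuel = 0 then 0
        else
          runB (fuel - 1) (((PySem.List.pyGetD store i (0, 0)).1, (PySem.List.pyGetD store i (0, 0)).2, 0) :: (cx, cy, i + 1) :: rest)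
            (PySem.List.pySetD status i 1) store festival length
      else runB fuel ((cx, cy, i + 1) :: rest) status store festival length
    else runB fuel rest status store festival length
termination_by (fuel, (frames.map (pvFrameW length)).sum)
decreasing_by all_goals first
  | (apply Prod.Lex.left; omega)
  | (apply Prod.Lex.right; simp only [List.map_cons, List.sum_cons, pvFrameW]; omega)

def dfs_alt (x : Int) (y : Int) (status : List Int) (store : List (Int × Int)) (festival : Int × Int) (statusIndex : Int) (length : Int) : Int :=
  if pvDist x y festival.1 festival.2 ≤ 1000 then 1
  else runB (pvZeros status) [(x, y, 0)] (PySem.List.pySetD status statusIndex 1) store festival length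

-- ===== PRECONDITION & SPEC =====
-- Pre_ excludes exactly the inputs where Python A raises IndexError: unless the festival is
-- already in range (immediate `return 1`), the mark `status[statusIndex] = 1` needs a valid
-- index and the loop reads store[i] and status[i] for every i < length.
def Pre_dfs (x : Int) (y : Int) (status : List Int) (store : List (Int × Int)) (festival : Int × Int) (statusIndex : Int) (length : Int) : Prop :=
  pvDist x y festival.1 festival.2 ≤ 1000 ∨
    (PySem.Raise.InRange status.length statusIndex ∧ length ≤ (status.length : Int) ∧ length ≤ (store.length : Int))
instance (x : Int) (y : Int) (status : List Int) (store : List (Int × Int)) (festival : Int × Int) (statusIndex : Int) (length : Int) : Decidable (Pre_dfs x y status store festival statusIndex length) := by unfold Pre_dfs; infer_instance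

def pvWitness_dfs : Int × Int × List Int × (List (Int × Int)) × (Int × Int) × Int × Int :=
  (0, 0, [0], [(5000, 0)], (2000, 0), 0, 1)

def Spec_dfs (x : Int) (y : Int) (status : List Int) (store : List (Int × Int)) (festival : Int × Int) (statusIndex : Int) (length : Int) (out : Int) : Prop := out = dfs_alt x y status store festival statusIndex length
instance (x : Int) (y : Int) (status : List Int) (store : List (Int × Int)) (festival : Int × Int) (statusIndex : Int) (length : Int) (out : Int) : Decidable (Spec_dfs x y status store festival statusIndex length out) := by unfold Spec_dfs; infer_instance

-- ===== CLAIM (what is proved, stated in full; the proofs are below) =====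
def Claim_equal_dfs : Prop := ∀ (x : Int) (y : Int) (status : List Int) (store : List (Int × Int)) (festival : Int × Int) (statusIndex : Int) (length : Int), Dom_dfs x y status store festival statusIndex length → Pre_dfs x y status store festival statusIndex length → Spec_dfs x y status store festival statusIndex length (dfs x y status store festival statusIndex length)

-- ===== LEMMAS AND PROOFS =====

-- setting an entry to 1 never increases the number of zeros
lemma pvZeros_set_le (l : List Int) (m : Nat) : pvZeros (l.set m 1) ≤ pvZeros l := by
  induction l generalizing m with
  | nil => simp [pvZeros]
  | cons a t ih =>
    cases m with
    | zero => simp [pvZeros, List.countP_cons]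
    | succ m => simpa [pvZeros, List.countP_cons] using ih m

-- setting a zero entry to 1 decreases the number of zeros by exactly one
lemma pvZeros_set_eq (l : List Int) (m : Nat) (h : l[m]? = some 0) :
    pvZeros (l.set m 1) + 1 = pvZeros l := by
  induction l generalizing m with
  | nil => simp at h
  | cons a t ih =>
    cases m with
    | zero => simp_all [pvZeros]
    | succ m =>
      simp only [List.getElem?_cons_succ] at h
      have := ih m h
      simp only [List.set_cons_succ, pvZeros, List.countP_cons] at this ⊢
      omega

-- pySetD either leaves the list unchanged or sets one position
lemma pySetD_cases (l : List Int) (i : Int) (v : Int) :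
    PySem.List.pySetD l i v = l ∨ ∃ m : Nat, PySem.List.pySetD l i v = l.set m v := by
  cases hm : PySem.List.pyIdx? l.length i with
  | none => left; simp [PySem.List.pySetD, PySem.List.pySet?, hm]
  | some m => right; exact ⟨m, by simp [PySem.List.pySetD, PySem.List.pySet?, hm]⟩

lemma pvZeros_pySetD_le (l : List Int) (i : Int) : pvZeros (PySem.List.pySetD l i 1) ≤ pvZeros l := by
  rcases pySetD_cases l i 1 with h | ⟨m, h⟩
  · rw [h]
  · rw [h]; exact pvZeros_set_le l m

lemma length_pySetD' (l : List Int) (i : Int) (v : Int) :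
    (PySem.List.pySetD l i v).length = l.length := by
  rcases pySetD_cases l i v with h | ⟨m, h⟩ <;> simp [h]

-- the loop guard `status[i] == 0` (ported as pyGetD status i 1 = 0) certifies a real zero
-- entry at the normalized index, and pySetD writes exactly there
lemma pyGuard_spec (l : List Int) (i : Int) (h : PySem.List.pyGetD l i 1 = 0) :
    ∃ m : Nat, l[m]? = some 0 ∧ PySem.List.pySetD l i 1 = l.set m 1 := by
  unfold PySem.List.pyGetD PySem.List.pyGet? at h
  cases hm : PySem.List.pyIdx? l.length i with
  | none => rw [hm] at h; simp at h
  | some m =>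
    rw [hm] at h
    cases hv : l[m]? with
    | none => simp [hv] at h
    | some v =>
      simp [hv] at h
      refine ⟨m, ?_, ?_⟩
      · rw [hv, h]
      · simp [PySem.List.pySetD, PySem.List.pySet?, hm]

lemma pyGuard_zeros (l : List Int) (i : Int) (h : PySem.List.pyGetD l i 1 = 0) :
    pvZeros (PySem.List.pySetD l i 1) + 1 = pvZeros l := by
  rcases pyGuard_spec l i h with ⟨m, hm, hset⟩
  rw [hset]; exact pvZeros_set_eq l m hm

-- one-step unfolding of runB
lemma runB_nil (fuel : Nat) (status : List Int) (store : List (Int × Int)) (festival : Int × Int) (length : Int) :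
    runB fuel [] status store festival length = 0 := by
  rw [runB.eq_def]

lemma runB_cons (fuel : Nat) (cx cy i : Int) (rest : List (Int × Int × Int)) (status : List Int) (store : List (Int × Int)) (festival : Int × Int) (length : Int) :
    runB fuel ((cx, cy, i) :: rest) status store festival length =
      (if i < length then
        if PySem.List.pyGetD status i 1 = 0 ∧
            pvDist cx cy (PySem.List.pyGetD store i (0, 0)).1 (PySem.List.pyGetD store i (0, 0)).2 ≤ 1000 then
          if pvDist (PySem.List.pyGetD store i (0, 0)).1 (PySem.List.pyGetD store i (0, 0)).2 festival.1 festival.2 ≤ 1000 then 1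
          else if fuel = 0 then 0
          else
            runB (fuel - 1) (((PySem.List.pyGetD store i (0, 0)).1, (PySem.List.pyGetD store i (0, 0)).2, 0) :: (cx, cy, i + 1) :: rest)
              (PySem.List.pySetD status i 1) store festival length
        else runB fuel ((cx, cy, i + 1) :: rest) status store festival length
      else runB fuel rest status store festival length) := by
  rw [runB.eq_def]

-- invariants of A's recursion: result is 0/1, status keeps its length, zeros do not increase
mutual
theorem dfsF_inv (fuel : Nat) (x y : Int) (status : List Int) (store : List (Int × Int)) (festival : Int × Int) (statusIndex : Int) (length : Int) :
    ((dfsF fuel x y status store festival statusIndex length).1 = 0 ∨ (dfsF fuel x y status store festival statusIndex length).1 = 1) ∧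
    (dfsF fuel x y status store festival statusIndex length).2.length = status.length ∧
    pvZeros (dfsF fuel x y status store festival statusIndex length).2 ≤ pvZeros status := by
  rw [dfsF.eq_def]
  split
  · simp
  · split
    · simp
    · have h := loopA_inv (fuel - 1) x y (PySem.List.pySetD status statusIndex 1) store festival length 0
      refine ⟨h.1, ?_, ?_⟩
      · rw [h.2.1, length_pySetD']
      · exact le_trans h.2.2 (pvZeros_pySetD_le status statusIndex)
termination_by (fuel, 0)
decreasing_by all_goals (apply Prod.Lex.left; omega)

theorem loopA_inv (fuel : Nat) (x y : Int) (status : List Int) (store : List (Int × Int)) (festival : Int × Int) (length : Int) (i : Int) :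
    ((loopA fuel x y status store festival length i).1 = 0 ∨ (loopA fuel x y status store festival length i).1 = 1) ∧
    (loopA fuel x y status store festival length i).2.length = status.length ∧
    pvZeros (loopA fuel x y status store festival length i).2 ≤ pvZeros status := by
  rw [loopA.eq_def]
  split
  · split
    · have hd := dfsF_inv fuel (PySem.List.pyGetD store i (0, 0)).1 (PySem.List.pyGetD store i (0, 0)).2 status store festival i length
      split
      · exact ⟨Or.inr (by assumption), hd.2⟩
      · have hl := loopA_inv fuel x y (dfsF fuel (PySem.List.pyGetD store i (0, 0)).1 (PySem.List.pyGetD store i (0, 0)).2 status store festival i length).2 store festival length (i + 1)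
        exact ⟨hl.1, hl.2.1.trans hd.2.1, hl.2.2.trans hd.2.2⟩
    · exact loopA_inv fuel x y status store festival length (i + 1)
  · simp
termination_by (fuel, (length - i).toNat + 1)
decreasing_by all_goals first
  | (apply Prod.Lex.left; omega)
  | (apply Prod.Lex.right; omega)
end

-- runB does not depend on the fuel as long as the fuel covers the zeros of status
theorem runB_irrel (f1 f2 : Nat) (frames : List (Int × Int × Int)) (status : List Int) (store : List (Int × Int)) (festival : Int × Int) (length : Int)
    (h1 : pvZeros status ≤ f1) (h2 : pvZeros status ≤ f2) :
    runB f1 frames status store festival length = runB f2 frames status store festival length := by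
  match frames with
  | [] => rw [runB_nil, runB_nil]
  | (cx, cy, i) :: rest =>
    rw [runB_cons f1, runB_cons f2]
    by_cases hi : i < length
    · rw [if_pos hi, if_pos hi]
      by_cases hguard : PySem.List.pyGetD status i 1 = 0 ∧
          pvDist cx cy (PySem.List.pyGetD store i (0, 0)).1 (PySem.List.pyGetD store i (0, 0)).2 ≤ 1000
      · rw [if_pos hguard, if_pos hguard]
        by_cases hfest : pvDist (PySem.List.pyGetD store i (0, 0)).1 (PySem.List.pyGetD store i (0, 0)).2 festival.1 festival.2 ≤ 1000
        · rw [if_pos hfest, if_pos hfest]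
        · rw [if_neg hfest, if_neg hfest]
          have hz := pyGuard_zeros status i hguard.1
          have e1 : ¬ f1 = 0 := by omega
          have e2 : ¬ f2 = 0 := by omega
          rw [if_neg e1, if_neg e2]
          exact runB_irrel (f1 - 1) (f2 - 1) _ _ store festival length (by omega) (by omega)
      · rw [if_neg hguard, if_neg hguard]
        exact runB_irrel f1 f2 _ status store festival length h1 h2
    · rw [if_neg hi, if_neg hi]
      exact runB_irrel f1 f2 rest status store festival length h1 h2
termination_by (f1, (frames.map (pvFrameW length)).sum)
decreasing_by all_goals first
  | (apply Prod.Lex.left; omega)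
  | (apply Prod.Lex.right; simp only [List.map_cons, List.sum_cons, pvFrameW]; omega)

-- simulation: running the machine with a top frame (x, y, i) is A's loop from cursor i,
-- then the rest of the stack on the loop's final status
theorem simL (f g : Nat) (x y : Int) (status : List Int) (store : List (Int × Int)) (festival : Int × Int) (length : Int) (i : Int) (rest : List (Int × Int × Int))
    (hf : pvZeros status ≤ f) (hg : pvZeros status ≤ g) :
    runB f ((x, y, i) :: rest) status store festival length
      = (if (loopA g x y status store festival length i).1 = 1 then 1
         else runB f rest (loopA g x y status store festival length i).2 store festival length) := by
  rw [runB_cons]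
  rw [loopA.eq_def]
  by_cases hi : i < length
  · rw [if_pos hi, if_pos hi]
    by_cases hguard : PySem.List.pyGetD status i 1 = 0 ∧
        pvDist x y (PySem.List.pyGetD store i (0, 0)).1 (PySem.List.pyGetD store i (0, 0)).2 ≤ 1000
    · rw [if_pos hguard, if_pos hguard]
      have hz := pyGuard_zeros status i hguard.1
      rw [dfsF.eq_def]
      by_cases hfest : pvDist (PySem.List.pyGetD store i (0, 0)).1 (PySem.List.pyGetD store i (0, 0)).2 festival.1 festival.2 ≤ 1000
      · rw [if_pos hfest, if_pos hfest]
        simp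
      · rw [if_neg hfest, if_neg hfest]
        have e1 : ¬ f = 0 := by omega
        have e2 : ¬ g = 0 := by omega
        rw [if_neg e1, if_neg e2]
        have hq := loopA_inv (g - 1) (PySem.List.pyGetD store i (0, 0)).1 (PySem.List.pyGetD store i (0, 0)).2 (PySem.List.pySetD status i 1) store festival length 0
        have hrec := simL (f - 1) (g - 1) (PySem.List.pyGetD store i (0, 0)).1 (PySem.List.pyGetD store i (0, 0)).2 (PySem.List.pySetD status i 1) store festival length 0 ((x, y, i + 1) :: rest) (by omega) (by omega)
        rw [hrec]
        set q := loopA (g - 1) (PySem.List.pyGetD store i (0, 0)).1 (PySem.List.pyGetD store i (0, 0)).2 (PySem.List.pySetD status i 1) store festival length 0 with hqdef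
        by_cases hq1 : q.1 = 1
        · simp [hq1]
        · rw [if_neg hq1, if_neg hq1]
          have hq2 : pvZeros q.2 ≤ pvZeros status - 1 := by
            have := hq.2.2
            omega
          have hrec2 := simL (f - 1) g x y q.2 store festival length (i + 1) rest (by omega) (by omega)
          rw [hrec2]
          set p := loopA g x y q.2 store festival length (i + 1) with hpdef
          by_cases hp1 : p.1 = 1
          · rw [if_pos hp1, if_pos hp1]
          · rw [if_neg hp1, if_neg hp1]
            have hpinv := loopA_inv g x y q.2 store festival length (i + 1)
            rw [← hpdef] at hpinv
            exact runB_irrel (f - 1) f rest p.2 store festival length (by have := hpinv.2.2; omega) (by omega)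
    · rw [if_neg hguard, if_neg hguard]
      exact simL f g x y status store festival length (i + 1) rest hf hg
  · rw [if_neg hi, if_neg hi]
    simp
termination_by (f, (length - i).toNat)
decreasing_by all_goals first
  | (apply Prod.Lex.left; omega)
  | (apply Prod.Lex.right; omega)

-- ===== VERDICT (by name: the statement is the Claim_ definition above) =====
theorem dfs_spec : Claim_equal_dfs := by
  intro x y status store festival statusIndex length _hdom _hpre
  unfold Spec_dfs dfs dfs_alt
  rw [dfsF.eq_def]
  by_cases hd : pvDist x y festival.1 festival.2 ≤ 1000
  · rw [if_pos hd, if_pos hd]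
  · rw [if_neg hd, if_neg hd]
    rw [if_neg (by omega : ¬ pvZeros status + 1 = 0)]
    have h0 : pvZeros (PySem.List.pySetD status statusIndex 1) ≤ pvZeros status :=
      pvZeros_pySetD_le status statusIndex
    have hs := simL (pvZeros status) (pvZeros status + 1 - 1) x y (PySem.List.pySetD status statusIndex 1) store festival length 0 [] (by omega) (by omega)
    rw [hs, runB_nil]
    have hinv := loopA_inv (pvZeros status + 1 - 1) x y (PySem.List.pySetD status statusIndex 1) store festival length 0
    rcases hinv.1 with h | h
    · rw [h, if_neg (by omega : ¬ (0:Int) = 1)]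
    · rw [h, if_pos rfl]
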